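-- pv_equiv track=rewrite | github.com/Korean88/Algorithms | Python/string/all_permutations.py | collect_permutations
-- ===== SOURCE A (Python) =====
-- def collect_permutations(str):
--     res = []
--     if str is None or len(str) == 0:
--         return res
--     res.append(str)
--     next_permutation = find_next(str)
--     while res.count(next_permutation) == 0:
--         res.append(next_permutation)
--         next_permutation = find_next(next_permutation)
--     return res
--
-- def find_next(str):
--     array = list(str)
--     i = len(str) - 1
--     while i and str[i] <= str[i-1]:
--         i -= 1
--     if i == 0:
--         res = "".join(array[::-1])
--     else:
--         j = len(str) - 1
--         if str[j] <= str[i-1]: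
--             while str[j] <= str[i-1]:
--                 j -= 1
--         array[i-1], array[j] = array[j], array[i-1]
--         array[i:] = array[i:][::-1]
--         res = "".join(array)
--     return res
-- ===== SOURCE B (Python) =====
-- def collect_permutations(str):
--     """All distinct permutations of str, starting at str and wrapping around in
--     lexicographic order: generate them all sorted, then rotate to start at str."""
--     if str is None or len(str) == 0:
--         return []
--     perms = _distinct_perms(sorted(str))
--     i = perms.index(str)
--     return perms[i:] + perms[:i]
--
--
-- def _distinct_perms(chars):
--     # chars: a sorted list of characters; every distinct permutation of them,
--     # as strings, in increasing lexicographic order.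
--     if not chars:
--         return [""]
--     return [c + tail
--             for c in _dedup(chars)
--             for tail in _distinct_perms(_without_first(chars, c))]
--
--
-- def _dedup(xs):
--     out = []
--     for x in xs:
--         if x not in out:
--             out.append(x)
--     return out
--
--
-- def _without_first(xs, v):
--     i = xs.index(v)
--     return xs[:i] + xs[i + 1:]
-- ===== Notes on version B (the rewrite author's own statement) =====
-- stated objective: alternative
-- what changed: A repeatedly applies an in-place next-permutation step and scans the result list for a repeat to detect the cycle; B generates all distinct permutations once by recursive choice of each leading character in sorted order and rotates that lexicographically sorted list so it starts at the input string.
import Mathlib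
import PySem

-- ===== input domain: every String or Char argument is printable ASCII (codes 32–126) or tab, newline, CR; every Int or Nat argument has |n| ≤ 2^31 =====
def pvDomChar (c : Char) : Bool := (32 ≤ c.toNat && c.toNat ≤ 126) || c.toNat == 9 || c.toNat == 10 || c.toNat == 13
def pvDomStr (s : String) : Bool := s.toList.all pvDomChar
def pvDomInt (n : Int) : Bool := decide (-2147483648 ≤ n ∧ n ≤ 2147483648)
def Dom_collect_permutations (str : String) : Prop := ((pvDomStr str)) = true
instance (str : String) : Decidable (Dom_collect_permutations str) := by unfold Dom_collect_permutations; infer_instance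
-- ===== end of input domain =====

-- B replaces A's repeated next-permutation stepping (with a linear membership scan per
-- step) by generating all distinct permutations in lexicographic order once and rotating
-- the sorted list so it starts at str; same return value, different algorithm.

-- ===== PORT A =====
-- A's helpers work over List Char; strings cross the boundary via String.toList/String.mk.
-- Every character access A performs is in range on the inputs it receives, so str[k] is
-- ported as getD (the default is never read).

-- while i and str[i] <= str[i-1]: i -= 1
def pvFindI (s : List Char) : Nat → Nat
  | 0 => 0
  | i+1 => if s.getD (i+1) ' ' ≤ s.getD i ' ' then pvFindI s i else i+1

-- j = len(str)-1; if str[j] <= a: while str[j] <= a: j -= 1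
-- (the scan always stops at some j with str[j] > a before reaching 0; the j = 0 base
-- case only makes the recursion total)
def pvFindJ (s : List Char) (a : Char) : Nat → Nat
  | 0 => 0
  | j+1 => if s.getD (j+1) ' ' ≤ a then pvFindJ s a j else j+1

def pvFindNext (s : List Char) : List Char :=
  let i := pvFindI s (s.length - 1)
  if i = 0 then s.reverse
  else
    let a := s.getD (i-1) ' '
    let j := pvFindJ s a (s.length - 1)
    -- array[i-1], array[j] = array[j], array[i-1]; array[i:] = array[i:][::-1]
    let l1 := (s.set (i-1) (s.getD j ' ')).set j a
    l1.take i ++ (l1.drop i).reverse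

-- the while loop of collect_permutations; the fuel argument only makes the recursion
-- total (factorial (length) + 1 steps always suffice, proved below)
def pvLoopA : Nat → List (List Char) → List Char → List (List Char)
  | 0, res, _ => res
  | fuel+1, res, next =>
    if res.count next = 0 then pvLoopA fuel (res ++ [next]) (pvFindNext next) else res

def collect_permutations (str : String) : List String :=
  let s := str.toList
  if s.length = 0 then []
  else (pvLoopA (Nat.factorial s.length + 1) [s] (pvFindNext s)).map (fun l => String.ofList l)

-- ===== PORT B =====
-- port of _dedup: out = []; for x in xs: if x not in out: out.append(x)
def pvDedupGo (out : List Char) : List Char → List Char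
  | [] => out
  | x :: xs => pvDedupGo (if x ∈ out then out else out ++ [x]) xs

def pvDedup (xs : List Char) : List Char := pvDedupGo [] xs

-- port of _without_first: xs[:i] + xs[i+1:] with i = xs.index(v) (slices of natural
-- bounds are take/drop, PySem.List.slice_to_natCast / slice_from_natCast); v is present
-- at every call site, so the none branch (Python would raise ValueError) is unreachable
def pvWithoutFirst (xs : List Char) (v : Char) : List Char :=
  match PySem.List.index? xs v with
  | some i => xs.take i ++ xs.drop (i+1)
  | none => xs

-- the two lemmas the termination argument of pvDistinctPerms cites
lemma pvDedupGo_sublist : ∀ (xs out : List Char), (pvDedupGo out xs).Sublist (out ++ xs) := by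
  intro xs
  induction xs with
  | nil => intro out; simp [pvDedupGo]
  | cons x xs ih =>
    intro out
    by_cases hx : x ∈ out
    · simp only [pvDedupGo, if_pos hx]
      exact (ih out).trans (List.Sublist.append_left (List.sublist_cons_self x xs) out)
    · simpa [pvDedupGo, if_neg hx] using ih (out ++ [x])

lemma mem_of_mem_pvDedup {xs : List Char} {v : Char} (h : v ∈ pvDedup xs) : v ∈ xs := by
  have := (pvDedupGo_sublist xs []).mem h
  simpa using this

lemma pvWithoutFirst_eq_erase {xs : List Char} {v : Char} (h : v ∈ xs) :
    pvWithoutFirst xs v = xs.erase v := by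
  have hsome : (PySem.List.index? xs v).isSome := by
    rw [PySem.List.index?_isSome_iff]; exact h
  obtain ⟨i, hi⟩ := Option.isSome_iff_exists.1 hsome
  obtain ⟨pre, suf, hxs, hlen, hpre⟩ := (PySem.List.index?_eq_some_iff xs v i).1 hi
  subst hxs
  rw [pvWithoutFirst, hi]
  show List.take i _ ++ List.drop (i+1) _ = _
  rw [List.erase_append_right _ (by simpa using hpre), List.take_left' hlen,
    List.erase_cons_head]
  have h1 : List.drop (i+1) (pre ++ v :: suf) = suf := by
    rw [show pre ++ v :: suf = (pre ++ [v]) ++ suf by simp]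
    exact List.drop_left' (by simp [hlen])
  rw [h1]

lemma pvWithoutFirst_length_lt {xs : List Char} {v : Char} (h : v ∈ pvDedup xs) :
    (pvWithoutFirst xs v).length < xs.length := by
  have hv := mem_of_mem_pvDedup h
  rw [pvWithoutFirst_eq_erase hv, List.length_erase_of_mem hv]
  have : xs ≠ [] := by rintro rfl; simp at hv
  have : 0 < xs.length := List.length_pos_iff.2 this
  omega

-- port of _distinct_perms (the nested list comprehension is flatMap/map)
def pvDistinctPerms (chars : List Char) : List (List Char) :=
  if chars = [] then [[]]
  else (pvDedup chars).attach.flatMap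
    (fun c => (pvDistinctPerms (pvWithoutFirst chars c.1)).map (fun t => c.1 :: t))
termination_by chars.length
decreasing_by exact pvWithoutFirst_length_lt c.2

def collect_permutations_alt (str : String) : List String :=
  let s := str.toList
  if s.length = 0 then []
  else
    let perms := pvDistinctPerms (PySem.List.sorted s (fun c => c) false)
    -- i = perms.index(str): str is always a member, the default is never read
    let i := (PySem.List.index? perms s).getD 0
    (perms.drop i ++ perms.take i).map (fun l => String.ofList l)

-- ===== PRECONDITION & SPEC =====
def Spec_collect_permutations (str : String) (out : List String) : Prop := out = collect_permutations_alt str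
instance (str : String) (out : List String) : Decidable (Spec_collect_permutations str out) := by unfold Spec_collect_permutations; infer_instance

-- ===== CLAIM (what is proved, stated in full; the proofs are below) =====
def Claim_equal_collect_permutations : Prop := ∀ (str : String), Dom_collect_permutations str → Spec_collect_permutations str (collect_permutations str)

-- ===== LEMMAS AND PROOFS =====

-- lexicographic-order toolbox (the LinearOrder on List Char is lexicographic)
lemma lex_append_lt_iff (u v w : List Char) : u ++ v < u ++ w ↔ v < w := by
  induction u with
  | nil => simp
  | cons a t ih => simp [ih]

lemma lex_append_le_iff (u v w : List Char) : u ++ v ≤ u ++ w ↔ v ≤ w := by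
  rw [le_iff_lt_or_eq, le_iff_lt_or_eq, lex_append_lt_iff, List.append_right_inj]

lemma lex_cons_lt_of_lt {a b : Char} (h : a < b) (v w : List Char) : a :: v < b :: w := by
  rw [List.cons_lt_cons_iff]; exact Or.inl h

-- a weakly increasing list is lexicographically minimal among its permutations
lemma sorted_asc_min : ∀ (m t : List Char), m.Pairwise (· ≤ ·) → t.Perm m → m ≤ t := by
  intro m
  induction m with
  | nil =>
    intro t _ hp
    rw [List.perm_nil.1 hp]
  | cons c m' ih =>
    intro t hs hp
    match t with
    | [] => exact absurd hp.symm (by simp [List.perm_nil])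
    | d :: t' =>
      have hd : d ∈ c :: m' := hp.mem_iff.1 List.mem_cons_self
      have hcd : c ≤ d := by
        rcases List.mem_cons.1 hd with h | h
        · exact le_of_eq h.symm
        · exact (List.pairwise_cons.1 hs).1 d h
      rcases lt_or_eq_of_le hcd with h | h
      · exact le_of_lt (lex_cons_lt_of_lt h m' t')
      · subst h
        have ht' : t'.Perm m' := hp.cons_inv
        have : m' ≤ t' := ih t' (List.pairwise_cons.1 hs).2 ht'
        have := (lex_append_le_iff [c] m' t').2 this
        simpa using this

-- a weakly decreasing list is lexicographically maximal among its permutations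
lemma sorted_desc_max : ∀ (l t : List Char), l.Pairwise (fun x y => y ≤ x) → t.Perm l → t ≤ l := by
  intro l
  induction l with
  | nil =>
    intro t _ hp
    rw [List.perm_nil.1 hp]
  | cons c l' ih =>
    intro t hs hp
    match t with
    | [] => exact absurd hp (by simp [List.perm_nil])
    | d :: t' =>
      have hd : d ∈ c :: l' := hp.subset List.mem_cons_self
      have hcd : d ≤ c := by
        rcases List.mem_cons.1 hd with h | h
        · exact le_of_eq h
        · exact (List.pairwise_cons.1 hs).1 d h
      rcases lt_or_eq_of_le hcd with h | h
      · exact le_of_lt (lex_cons_lt_of_lt h t' l')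
      · subst h
        have ht' : t'.Perm l' := hp.cons_inv
        have : t' ≤ l' := ih t' (List.pairwise_cons.1 hs).2 ht'
        have := (lex_append_le_iff [d] t' l').2 this
        simpa using this

-- first-difference decomposition of a strict lexicographic comparison of equal lengths
lemma lt_firstDiff : ∀ (s t : List Char), s.length = t.length → s < t →
    ∃ u a v b w, s = u ++ a :: v ∧ t = u ++ b :: w ∧ a < b := by
  intro s
  induction s with
  | nil =>
    intro t hlen h
    have : t = [] := by simpa using hlen.symm
    subst this
    exact absurd h (lt_irrefl _)
  | cons a s' ih =>
    intro t hlen h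
    match t with
    | [] => simp at hlen
    | b :: t' =>
      rcases List.cons_lt_cons_iff.1 h with hab | ⟨hab, hst⟩
      · exact ⟨[], a, s', b, t', rfl, rfl, hab⟩
      · subst hab
        obtain ⟨u, c, v, d, w, hs', ht', hcd⟩ := ih t' (by simpa using hlen) hst
        exact ⟨a :: u, c, v, d, w, by rw [List.cons_append, hs'], by rw [List.cons_append, ht'], hcd⟩

-- consecutive non-increase gives pairwise non-increase
lemma pairwise_ge_of_consec (l : List Char)
    (h : ∀ k, (hk : k + 1 < l.length) → l[k+1] ≤ l[k]) :
    l.Pairwise (fun x y => y ≤ x) := by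
  have step : ∀ q (hq : q < l.length), ∀ p, (hp : p ≤ q) → l[q] ≤ l[p]'(by omega) := by
    intro q
    induction q with
    | zero =>
      intro hq p hp
      have : p = 0 := by omega
      subst this; exact le_refl _
    | succ q ihq =>
      intro hq p hp
      rcases Nat.eq_or_lt_of_le hp with hpq | hpq
      · subst hpq; exact le_refl _
      · exact le_trans (h q (by omega)) (ihq (by omega) p (by omega))
  rw [List.pairwise_iff_getElem]
  intro i j hi hj hij
  exact step j hj i (by omega)

-- pvDedup facts
lemma pvDedupGo_nodup : ∀ (xs out : List Char), out.Nodup → (pvDedupGo out xs).Nodup := by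
  intro xs
  induction xs with
  | nil => intro out h; simpa [pvDedupGo] using h
  | cons x xs ih =>
    intro out h
    by_cases hx : x ∈ out
    · simpa [pvDedupGo, if_pos hx] using ih out h
    · have : (out ++ [x]).Nodup := by
        simp only [List.nodup_append, List.nodup_cons, List.not_mem_nil, not_false_iff,
          List.nodup_nil, and_true, true_and]
        exact ⟨h, fun a ha => by simp; exact fun e => hx (e ▸ ha)⟩
      simpa [pvDedupGo, if_neg hx] using ih (out ++ [x]) this

lemma pvDedup_nodup (xs : List Char) : (pvDedup xs).Nodup := pvDedupGo_nodup xs [] List.nodup_nil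

lemma mem_pvDedupGo : ∀ (xs out : List Char) (v : Char), v ∈ pvDedupGo out xs ↔ v ∈ out ∨ v ∈ xs := by
  intro xs
  induction xs with
  | nil => intro out v; simp [pvDedupGo]
  | cons x xs ih =>
    intro out v
    by_cases hx : x ∈ out
    · rw [pvDedupGo, if_pos hx, ih]
      constructor
      · rintro (h | h)
        · exact Or.inl h
        · exact Or.inr (List.mem_cons_of_mem _ h)
      · rintro (h | h)
        · exact Or.inl h
        · rcases List.mem_cons.1 h with rfl | h
          · exact Or.inl hx
          · exact Or.inr h
    · rw [pvDedupGo, if_neg hx, ih]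
      simp only [List.mem_append, List.mem_singleton, List.mem_cons]
      tauto

lemma mem_pvDedup {xs : List Char} {v : Char} : v ∈ pvDedup xs ↔ v ∈ xs := by
  rw [pvDedup, mem_pvDedupGo]; simp

lemma pvDedup_pairwise_lt {xs : List Char} (hs : xs.Pairwise (· ≤ ·)) :
    (pvDedup xs).Pairwise (· < ·) := by
  have h1 : (pvDedup xs).Pairwise (· ≤ ·) :=
    hs.sublist (by simpa using pvDedupGo_sublist xs [])
  have h2 : (pvDedup xs).Pairwise (· ≠ ·) := pvDedup_nodup xs
  exact (h1.and h2).imp (fun h => lt_of_le_of_ne h.1 h.2)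

-- pvDistinctPerms facts
lemma pvDistinctPerms_eq {chars : List Char} (h : chars ≠ []) :
    pvDistinctPerms chars =
      (pvDedup chars).flatMap
        (fun c => (pvDistinctPerms (chars.erase c)).map (fun t => c :: t)) := by
  rw [pvDistinctPerms, if_neg h]
  have h1 : (pvDedup chars).attach.flatMap
      (fun c => (pvDistinctPerms (pvWithoutFirst chars c.1)).map (fun t => c.1 :: t)) =
      (pvDedup chars).flatMap
        (fun c => (pvDistinctPerms (pvWithoutFirst chars c)).map (fun t => c :: t)) := by
    simp
  rw [h1, List.flatMap_def, List.flatMap_def]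
  congr 1
  apply List.map_congr_left
  intro c hc
  rw [pvWithoutFirst_eq_erase (mem_of_mem_pvDedup hc)]

lemma mem_pvDistinctPerms (l t : List Char) : t ∈ pvDistinctPerms l ↔ t.Perm l := by
  generalize hn : l.length = n
  induction n using Nat.strong_induction_on generalizing l t with
  | _ n ih =>
  subst hn
  by_cases h0 : l = []
  · subst h0; simp [pvDistinctPerms, List.perm_nil]
  · have hpos : 0 < l.length := List.length_pos_iff.2 h0
    rw [pvDistinctPerms_eq h0]
    simp only [List.mem_flatMap, List.mem_map]
    constructor
    · rintro ⟨c, hc, t', ht', rfl⟩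
      have hcl : c ∈ l := mem_pvDedup.1 hc
      have hlt : (l.erase c).length < l.length := by
        rw [List.length_erase_of_mem hcl]; omega
      have ht'p : t'.Perm (l.erase c) := (ih _ hlt _ t' rfl).1 ht'
      exact (ht'p.cons c).trans (List.perm_cons_erase hcl).symm
    · intro hp
      match t with
      | [] =>
        exact absurd (List.perm_nil.1 hp.symm) h0
      | c :: t' =>
        have hcl : c ∈ l := hp.subset List.mem_cons_self
        have hlt : (l.erase c).length < l.length := by
          rw [List.length_erase_of_mem hcl]; omega
        have ht'p : t'.Perm (l.erase c) :=
          (hp.trans (List.perm_cons_erase hcl)).cons_inv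
        exact ⟨c, mem_pvDedup.2 hcl, t', (ih _ hlt _ t' rfl).2 ht'p, rfl⟩

lemma pvDistinctPerms_sorted : ∀ (l : List Char), l.Pairwise (· ≤ ·) →
    (pvDistinctPerms l).Pairwise (· < ·) := by
  intro l
  generalize hn : l.length = n
  induction n using Nat.strong_induction_on generalizing l with
  | _ n ih =>
  intro hs
  subst hn
  by_cases h0 : l = []
  · subst h0; simp [pvDistinctPerms]
  · have hpos : 0 < l.length := List.length_pos_iff.2 h0
    rw [pvDistinctPerms_eq h0, List.pairwise_flatMap]
    constructor
    · intro c hc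
      rw [List.pairwise_map]
      have hcl : c ∈ l := mem_pvDedup.1 hc
      have hlt : (l.erase c).length < l.length := by
        rw [List.length_erase_of_mem hcl]; omega
      have hrec : (pvDistinctPerms (l.erase c)).Pairwise (· < ·) :=
        ih _ hlt _ rfl (hs.sublist (List.erase_sublist ..))
      exact hrec.imp (fun h => List.cons_lt_cons_iff.2 (Or.inr ⟨rfl, h⟩))
    · have hd : (pvDedup l).Pairwise (· < ·) := pvDedup_pairwise_lt hs
      refine hd.imp (fun hab => ?_)
      intro x hx y hy
      obtain ⟨x', -, rfl⟩ := List.mem_map.1 hx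
      obtain ⟨y', -, rfl⟩ := List.mem_map.1 hy
      exact lex_cons_lt_of_lt hab _ _

lemma length_pvDistinctPerms_le : ∀ (l : List Char),
    (pvDistinctPerms l).length ≤ Nat.factorial l.length := by
  intro l
  generalize hn : l.length = n
  induction n using Nat.strong_induction_on generalizing l with
  | _ n ih =>
  subst hn
  by_cases h0 : l = []
  · subst h0; simp [pvDistinctPerms, Nat.factorial]
  · have hpos : 0 < l.length := List.length_pos_iff.2 h0
    rw [pvDistinctPerms_eq h0, List.length_flatMap]
    have hbound : ∀ x ∈ (pvDedup l).map
        (fun c => ((pvDistinctPerms (l.erase c)).map (fun t => c :: t)).length),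
        x ≤ Nat.factorial (l.length - 1) := by
      intro x hx
      obtain ⟨c, hc, rfl⟩ := List.mem_map.1 hx
      rw [List.length_map]
      have hcl : c ∈ l := mem_pvDedup.1 hc
      have hlt : (l.erase c).length < l.length := by
        rw [List.length_erase_of_mem hcl]; omega
      have := ih _ hlt _ rfl
      rwa [List.length_erase_of_mem hcl] at this
    calc ((pvDedup l).map
        (fun c => ((pvDistinctPerms (l.erase c)).map (fun t => c :: t)).length)).sum
        ≤ ((pvDedup l).map
          (fun c => ((pvDistinctPerms (l.erase c)).map (fun t => c :: t)).length)).length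
            • Nat.factorial (l.length - 1) := List.sum_le_card_nsmul _ _ hbound
      _ = (pvDedup l).length * Nat.factorial (l.length - 1) := by
          rw [List.length_map, smul_eq_mul]
      _ ≤ l.length * Nat.factorial (l.length - 1) := by
          have : (pvDedup l).length ≤ l.length :=
            List.Sublist.length_le (by simpa using pvDedupGo_sublist l [])
          exact Nat.mul_le_mul_right _ this
      _ = Nat.factorial l.length := by
          rw [show l.length = l.length - 1 + 1 by omega, Nat.factorial_succ,
            show l.length - 1 + 1 - 1 = l.length - 1 by omega]

-- pvFindI scan characterisation
lemma pvFindI_spec (s : List Char) (m : Nat) (hm : m < s.length) :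
    pvFindI s m ≤ m ∧
    (∀ k, pvFindI s m ≤ k → k < m → s.getD (k+1) ' ' ≤ s.getD k ' ') ∧
    (pvFindI s m = 0 ∨ s.getD (pvFindI s m - 1) ' ' < s.getD (pvFindI s m) ' ') := by
  induction m with
  | zero => exact ⟨le_refl 0, fun k h1 h2 => absurd h2 (by omega), Or.inl rfl⟩
  | succ m ihm =>
    simp only [pvFindI]
    by_cases hc : s.getD (m+1) ' ' ≤ s.getD m ' '
    · rw [if_pos hc]
      obtain ⟨h1, h2, h3⟩ := ihm (by omega)
      refine ⟨by omega, ?_, h3⟩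
      intro k hk1 hk2
      rcases Nat.lt_succ_iff_lt_or_eq.1 hk2 with h | h
      · exact h2 k hk1 h
      · subst h; exact hc
    · rw [if_neg hc]
      refine ⟨le_refl _, fun k h1 h2 => by omega, Or.inr ?_⟩
      simpa using not_le.1 hc

lemma pvFindI_eq_zero (s : List Char) (m : Nat)
    (h : ∀ k, k < m → s.getD (k+1) ' ' ≤ s.getD k ' ') : pvFindI s m = 0 := by
  induction m with
  | zero => rfl
  | succ m ihm =>
    simp only [pvFindI]
    rw [if_pos (h m (by omega))]
    exact ihm (fun k hk => h k (by omega))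

-- pvFindJ scan characterisation
lemma pvFindJ_spec (s : List Char) (a : Char) (m : Nat)
    (hex : ∃ k, k ≤ m ∧ a < s.getD k ' ') :
    pvFindJ s a m ≤ m ∧ a < s.getD (pvFindJ s a m) ' ' ∧
    (∀ k, pvFindJ s a m < k → k ≤ m → s.getD k ' ' ≤ a) := by
  induction m with
  | zero =>
    obtain ⟨k, hk, hka⟩ := hex
    have : k = 0 := by omega
    subst this
    exact ⟨le_refl _, hka, fun k h1 h2 => by omega⟩
  | succ m ihm =>
    simp only [pvFindJ]
    by_cases hc : s.getD (m+1) ' ' ≤ a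
    · rw [if_pos hc]
      have hex' : ∃ k, k ≤ m ∧ a < s.getD k ' ' := by
        obtain ⟨k, hk, hka⟩ := hex
        refine ⟨k, ?_, hka⟩
        by_contra hkm
        have : k = m + 1 := by omega
        subst this
        exact absurd hka (not_lt.2 hc)
      obtain ⟨h1, h2, h3⟩ := ihm hex'
      refine ⟨by omega, h2, ?_⟩
      intro k hk1 hk2
      by_cases hk : k = m + 1
      · subst hk; exact hc
      · exact h3 k hk1 (by omega)
    · rw [if_neg hc]
      exact ⟨le_refl _, not_le.1 hc, fun k h1 h2 => by omega⟩

-- find_next on the lexicographically largest arrangement wraps to its reverse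
lemma pvFindNext_max {s : List Char} (hs : s.Pairwise (fun x y => y ≤ x)) :
    pvFindNext s = s.reverse := by
  have hi : pvFindI s (s.length - 1) = 0 := by
    apply pvFindI_eq_zero
    intro k hk
    by_cases hk1 : k + 1 < s.length
    · rw [List.getD_eq_getElem s ' ' hk1, List.getD_eq_getElem s ' ' (by omega)]
      exact (List.pairwise_iff_getElem.1 hs) k (k+1) (by omega) hk1 (by omega)
    · omega
  simp [pvFindNext, hi]

-- find_next elsewhere is the immediate lexicographic successor among permutations
lemma pvFindNext_succ {s : List Char} (hns : ¬ s.Pairwise (fun x y => y ≤ x)) :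
    (pvFindNext s).Perm s ∧ s < pvFindNext s ∧
    ∀ t, t.Perm s → s < t → pvFindNext s ≤ t := by
  have hne : s ≠ [] := by rintro rfl; exact hns (by simp)
  have hpos : 0 < s.length := List.length_pos_iff.2 hne
  set n := s.length with hn
  obtain ⟨hi_le, hcons, hzero⟩ := pvFindI_spec s (n-1) (by omega)
  set i := pvFindI s (n-1) with hidef
  have hi0 : i ≠ 0 := by
    intro h0
    apply hns
    apply pairwise_ge_of_consec
    intro k hk
    have hcons' := hcons k (by omega) (by omega)
    rwa [List.getD_eq_getElem s ' ' (by omega), List.getD_eq_getElem s ' ' (by omega)] at hcons'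
  have hi1 : 1 ≤ i := Nat.one_le_iff_ne_zero.2 hi0
  have hilt : i ≤ n - 1 := hi_le
  have ha : s.getD (i-1) ' ' < s.getD i ' ' := by
    rcases hzero with h | h
    · exact absurd h hi0
    · exact h
  set a := s.getD (i-1) ' ' with hadef
  obtain ⟨hj_le, hj_gt, hj_after⟩ := pvFindJ_spec s a (n-1) ⟨i, by omega, ha⟩
  set j := pvFindJ s a (n-1) with hjdef
  have hij : i ≤ j := by
    by_contra hlt'
    exact absurd (hj_after i (by omega) (by omega)) (not_le.2 ha)
  set b := s.getD j ' ' with hbdef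
  have hab : a < b := hj_gt
  have hjn : j ≤ n - 1 := hj_le
  set u := s.take (i-1) with hudef
  set v := s.drop i with hvdef
  have hvlen : v.length = n - i := by rw [hvdef, List.length_drop, ← hn]
  have hulen : u.length = i - 1 := by rw [hudef, List.length_take, ← hn]; omega
  set p := j - i with hpdef
  have hplt : p < v.length := by omega
  have hvq : ∀ q, (hq : q < v.length) → v[q] = s.getD (i+q) ' ' := by
    intro q hq
    simp only [hvdef]
    rw [List.getElem_drop, List.getD_eq_getElem s ' ' (by omega)]
  have hvp : v[p]'hplt = b := by
    rw [hvq p hplt, hbdef]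
    congr 1; omega
  have hV : v = v.take p ++ b :: v.drop (p+1) := by
    conv_lhs => rw [← List.take_append_drop p v]
    congr 1
    rw [List.drop_eq_getElem_cons hplt, hvp]
  set v1 := v.take p with hv1def
  set v2 := v.drop (p+1) with hv2def
  have hlenv1 : v1.length = p := by rw [hv1def, List.length_take]; omega
  have hS : s = u ++ a :: v := by
    conv_lhs => rw [← List.take_append_drop (i-1) s]
    congr 1
    rw [List.drop_eq_getElem_cons (by omega : i - 1 < s.length)]
    congr 1
    · rw [hadef, List.getD_eq_getElem s ' ' (by omega)]
    · rw [hvdef]; congr 1; omega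
  have hvdesc : v.Pairwise (fun x y => y ≤ x) := by
    apply pairwise_ge_of_consec
    intro k hk
    rw [hvq (k+1) hk, hvq k (by omega)]
    have hcons' := hcons (i+k) (by omega) (by omega)
    rw [show i + (k+1) = i + k + 1 by omega]
    exact hcons'
  have hafter : ∀ q, (hq : q < v.length) → p < q → v[q] ≤ a := by
    intro q hq hpq
    rw [hvq q hq]
    exact hj_after (i+q) (by omega) (by omega)
  have hbefore : ∀ q, (hq : q < v.length) → q ≤ p → b ≤ v[q] := by
    intro q hq hqp
    rcases Nat.eq_or_lt_of_le hqp with h | h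
    · subst h; rw [hvp]
    · have hpw := (List.pairwise_iff_getElem.1 hvdesc) q p hq hplt h
      rwa [hvp] at hpw
  -- the computed next permutation, in structural form
  have hstep1 : pvFindNext s =
      ((s.set (i-1) b).set j a).take i ++ (((s.set (i-1) b).set j a).drop i).reverse := by
    simp only [pvFindNext]
    rw [← hn, ← hidef, if_neg hi0, ← hadef, ← hjdef, ← hbdef]
  have hTake : ((s.set (i-1) b).set j a).take i = u ++ [b] := by
    rw [List.take_set, List.set_eq_of_length_le (by rw [List.length_take]; omega)]
    rw [List.take_set]
    have h1 : s.take i = u ++ [a] := by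
      rw [show i = (i-1)+1 by omega, List.take_succ, hudef]
      congr 1
      rw [List.getElem?_eq_getElem (by omega : i - 1 < s.length)]
      rw [hadef, List.getD_eq_getElem s ' ' (by omega)]
      rfl
    rw [h1, List.set_append_right _ _ (by omega), hulen]
    congr 1
    rw [show i - 1 - (i-1) = 0 by omega]
    rfl
  have hDrop : ((s.set (i-1) b).set j a).drop i = v.set p a := by
    rw [List.drop_set, if_neg (by omega)]
    rw [List.drop_set, if_pos (by omega), ← hvdef, hpdef]
  have hresult : pvFindNext s = u ++ b :: (v.set p a).reverse := by
    rw [hstep1, hTake, hDrop, List.append_assoc]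
    rfl
  have hset : v.set p a = v1 ++ a :: v2 := by
    conv_lhs => rw [hV]
    rw [List.set_append_right _ _ (by omega), hlenv1, show p - p = 0 by omega]
    rfl
  -- permutation facts
  have hrev1 : ((v.set p a).reverse).Perm (a :: (v1 ++ v2)) := by
    rw [hset]
    exact (List.reverse_perm _).trans List.perm_middle
  have hv_mid : v.Perm (b :: (v1 ++ v2)) := by
    conv_lhs => rw [hV]
    exact List.perm_middle
  have hperm : (pvFindNext s).Perm s := by
    rw [hresult, hS]
    apply List.Perm.append_left
    exact ((hrev1.cons b).trans (List.Perm.swap a b _)).trans ((hv_mid.symm).cons a)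
  have hlt : s < pvFindNext s := by
    rw [hresult]
    conv_lhs => rw [hS]
    exact (lex_append_lt_iff u _ _).2 (lex_cons_lt_of_lt hab _ _)
  -- the new suffix is weakly increasing
  have hwsorted : ((v.set p a).reverse).Pairwise (· ≤ ·) := by
    rw [List.pairwise_reverse, hset, List.pairwise_append]
    refine ⟨hvdesc.sublist (hv1def ▸ List.take_sublist ..), ?_, ?_⟩
    · rw [List.pairwise_cons]
      constructor
      · intro y hy
        obtain ⟨q, hq, rfl⟩ := List.mem_iff_getElem.1 hy
        have hq' : p + 1 + q < v.length := by
          rw [hv2def, List.length_drop] at hq; omega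
        simp only [hv2def, List.getElem_drop]
        exact hafter (p+1+q) hq' (by omega)
      · exact hvdesc.sublist (hv2def ▸ List.drop_sublist ..)
    · intro x hx y hy
      obtain ⟨q, hq, rfl⟩ := List.mem_iff_getElem.1 hx
      have hq' : q < v.length := by rw [hv1def, List.length_take] at hq; omega
      have hxq : v1[q]'hq = v[q]'hq' := by simp only [hv1def, List.getElem_take]
      have hbx : b ≤ v1[q]'hq := by rw [hxq]; exact hbefore q hq' (by rw [hv1def, List.length_take] at hq; omega)
      rcases List.mem_cons.1 hy with rfl | hy2
      · exact le_trans (le_of_lt hab) hbx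
      · obtain ⟨q2, hq2, rfl⟩ := List.mem_iff_getElem.1 hy2
        have hq2' : p + 1 + q2 < v.length := by rw [hv2def, List.length_drop] at hq2; omega
        simp only [hv2def, List.getElem_drop]
        exact le_trans (le_trans (hafter (p+1+q2) hq2' (by omega)) (le_of_lt hab)) hbx
  refine ⟨hperm, hlt, ?_⟩
  -- minimality
  intro t ht hst
  have hlen : s.length = t.length := ht.length_eq.symm
  obtain ⟨u', c, v'', d, w', hs', ht', hcd⟩ := lt_firstDiff s t hlen hst
  have hu'pre : u' = s.take u'.length := by
    rw [hs', List.take_left]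
  have hm'lt : u'.length < n := by
    rw [hn, hs']; simp
  have hc_eq : s[u'.length]'(by omega) = c := by
    simp only [hs']
    rw [List.getElem_append_right (le_refl _)]
    simp
  rcases lt_trichotomy u'.length (i-1) with hm | hm | hm
  · -- the first difference is inside A's untouched prefix: strictly smaller result
    apply le_of_lt
    rw [hresult, ht']
    have hm'u : u'.length < u.length := by omega
    have hu_take : u.take u'.length = u' := by
      rw [hudef, List.take_take, min_eq_left (by omega)]
      exact hu'pre.symm
    have hu_elem : u[u'.length]'hm'u = c := by
      simp only [hudef, List.getElem_take]
      exact hc_eq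
    have hu_dec : u = u' ++ c :: u.drop (u'.length+1) := by
      calc u = u.take u'.length ++ u.drop u'.length := (List.take_append_drop _ _).symm
        _ = u' ++ (u[u'.length]'hm'u :: u.drop (u'.length+1)) := by
            rw [hu_take, List.drop_eq_getElem_cons hm'u]
        _ = u' ++ c :: u.drop (u'.length+1) := by rw [hu_elem]
    rw [hu_dec, List.append_assoc, List.cons_append]
    exact (lex_append_lt_iff u' _ _).2 (lex_cons_lt_of_lt hcd _ _)
  · -- the first difference is exactly at position i-1
    have hu'u : u' = u := by rw [hu'pre, hm, hudef]
    have hceq : c = a := by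
      have he : u ++ a :: v = u' ++ c :: v'' := hS.symm.trans hs'
      rw [hu'u] at he
      have he2 := (List.append_right_inj u).1 he
      injection he2 with h1 _
      exact h1.symm
    have hperm_t : (d :: w').Perm (a :: v) := by
      have h1 : t.Perm s := ht
      rw [ht', hu'u] at h1
      conv at h1 => rw [hS]
      exact (List.perm_append_left_iff u).1 h1
    have hda : a < d := hceq ▸ hcd
    have hd_v : d ∈ v := by
      rcases List.mem_cons.1 (hperm_t.subset List.mem_cons_self) with h | h
      · exact absurd (h ▸ hda) (lt_irrefl a)
      · exact h
    have hdb : b ≤ d := by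
      obtain ⟨q, hq, hqd⟩ := List.mem_iff_getElem.1 hd_v
      by_cases hqp : q ≤ p
      · have := hbefore q hq hqp; rwa [hqd] at this
      · have := hafter q hq (by omega)
        rw [hqd] at this
        exact absurd this (not_le.2 hda)
    rcases lt_or_eq_of_le hdb with hbd | hbd
    · apply le_of_lt
      rw [hresult, ht', hu'u]
      exact (lex_append_lt_iff u _ _).2 (lex_cons_lt_of_lt hbd _ _)
    · -- d = b: compare the suffixes; ours is sorted, hence minimal
      have hbav : b ∈ a :: v := by rw [hbd]; exact List.mem_cons_of_mem a hd_v
      have hw'perm : w'.Perm ((a :: v).erase b) := by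
        have h1 : (a :: v).Perm (b :: (a :: v).erase b) := List.perm_cons_erase hbav
        exact ((hbd ▸ hperm_t).trans h1).cons_inv
      have hbv : b ∈ v := hbd ▸ hd_v
      have herase3 : (a :: v).erase b = a :: v.erase b :=
        List.erase_cons_tail (by simp; exact ne_of_lt hab)
      have h2 : (v.erase b).Perm (v1 ++ v2) := by
        have hv2p : (v1 ++ b :: v2).Perm (b :: (v1 ++ v2)) := List.perm_middle
        rw [← hV] at hv2p
        exact ((List.perm_cons_erase hbv).symm.trans hv2p).cons_inv
      have hwperm : ((v.set p a).reverse).Perm ((a :: v).erase b) := by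
        rw [herase3]
        exact hrev1.trans ((h2.symm).cons a)
      rw [hresult, ht', hu'u, ← hbd]
      have hww' : (v.set p a).reverse ≤ w' :=
        sorted_asc_min _ _ hwsorted (hw'perm.trans hwperm.symm)
      have hfin := (lex_append_le_iff (u ++ [b]) ((v.set p a).reverse) w').2 hww'
      simpa using hfin
  · -- the difference would be inside the maximal suffix: impossible
    exfalso
    have hpre : t.take i = s.take i := by
      rw [ht', hs', List.take_append_of_le_length (by omega),
        List.take_append_of_le_length (by omega)]
    have htdec : t = s.take i ++ t.drop i := by
      conv_lhs => rw [← List.take_append_drop i t]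
      rw [hpre]
    have hsdec : s = s.take i ++ v := by rw [hvdef, List.take_append_drop]
    have hpermdrop : (t.drop i).Perm v := by
      have h1 : (s.take i ++ t.drop i).Perm (s.take i ++ v) := by
        rw [← htdec, ← hsdec]; exact ht
      exact (List.perm_append_left_iff _).1 h1
    have hle : t ≤ s := by
      calc t = s.take i ++ t.drop i := htdec
        _ ≤ s.take i ++ v := (lex_append_le_iff _ _ _).2
            (sorted_desc_max v (t.drop i) hvdesc hpermdrop)
        _ = s := hsdec.symm
    exact absurd (lt_of_lt_of_le hst hle) (lt_irrefl s)

-- stepping through the sorted list of distinct permutations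
lemma pvFindNext_cycle (s : List Char) (hne : s ≠ [])
    (L : List (List Char)) (hL : L = pvDistinctPerms (PySem.List.sorted s (fun c => c) false))
    (k : Nat) (hk : k < L.length) :
    pvFindNext (L[k]) = L[(k+1) % L.length]'(by exact Nat.mod_lt _ (by omega)) := by
  have hsp : (PySem.List.sorted s (fun c => c) false).Perm s := PySem.List.sorted_perm s _ false
  have hsorted : (PySem.List.sorted s (fun c => c) false).Pairwise (· ≤ ·) := by
    simpa using PySem.List.sorted_pairwise s (fun c => c)
  have hmemL : ∀ t, t ∈ L ↔ t.Perm s := by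
    intro t
    rw [hL, mem_pvDistinctPerms]
    exact ⟨fun h => h.trans hsp, fun h => h.trans hsp.symm⟩
  have hLs : L.Pairwise (· < ·) := by rw [hL]; exact pvDistinctPerms_sorted _ hsorted
  have hmono : ∀ p q (hp : p < L.length) (hq : q < L.length), p < q → L[p] < L[q] :=
    fun p q hp hq h => (List.pairwise_iff_getElem.1 hLs) p q hp hq h
  have hxp : (L[k]).Perm s := (hmemL _).1 (List.getElem_mem hk)
  by_cases hdesc : (L[k]).Pairwise (fun x y => y ≤ x)
  · -- L[k] is the largest permutation: k is the last index and find_next wraps to L[0]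
    have hmax : ∀ t ∈ L, t ≤ L[k] := by
      intro t htL
      exact sorted_desc_max _ _ hdesc (((hmemL t).1 htL).trans hxp.symm)
    have hklast : k = L.length - 1 := by
      by_contra hck
      have hk1 : k + 1 < L.length := by omega
      have hlt := hmono k (k+1) hk hk1 (by omega)
      exact absurd (hmax _ (List.getElem_mem hk1)) (not_le.2 hlt)
    have hrevmem : (L[k]).reverse ∈ L := (hmemL _).2 ((List.reverse_perm _).trans hxp)
    obtain ⟨m, hm, hmrev⟩ := List.mem_iff_getElem.1 hrevmem
    have hrevasc : ((L[k]).reverse).Pairwise (· ≤ ·) := by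
      rw [List.pairwise_reverse]; exact hdesc
    have hmin0 : (L[k]).reverse ≤ L[0]'(by omega) :=
      sorted_asc_min _ _ hrevasc
        (((hmemL _).1 (List.getElem_mem (by omega))).trans
          (((List.reverse_perm _).trans hxp).symm))
    have h0m : L[0]'(by omega) ≤ L[m]'hm := by
      rcases Nat.eq_zero_or_pos m with h | h
      · subst h; exact le_refl _
      · exact le_of_lt (hmono 0 m (by omega) hm h)
    have heq : (L[k]).reverse = L[0]'(by omega) := le_antisymm hmin0 (hmrev ▸ h0m)
    have hidx : (k+1) % L.length = 0 := by
      rw [hklast, show L.length - 1 + 1 = L.length by omega, Nat.mod_self]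
    rw [pvFindNext_max hdesc, heq]
    simp only [hidx]
  · -- otherwise find_next is the immediate successor, i.e. L[k+1]
    obtain ⟨hfp, hflt, hfmin⟩ := pvFindNext_succ hdesc
    have hfmem : pvFindNext (L[k]) ∈ L := (hmemL _).2 (hfp.trans hxp)
    obtain ⟨m, hm, hmf⟩ := List.mem_iff_getElem.1 hfmem
    have hkm : k < m := by
      by_contra hc2
      have hle : L[m]'hm ≤ L[k]'hk := by
        rcases Nat.lt_or_ge m k with h | h
        · exact le_of_lt (hmono m k hm hk h)
        · have : m = k := by omega
          subst this; exact le_refl _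
      rw [hmf] at hle
      exact absurd hflt (not_lt.2 hle)
    have hkN : k + 1 < L.length := by omega
    have hidx : (k+1) % L.length = k+1 := Nat.mod_eq_of_lt hkN
    have h1 : pvFindNext (L[k]) ≤ L[k+1]'hkN :=
      hfmin _ (((hmemL _).1 (List.getElem_mem hkN)).trans hxp.symm)
        (hmono k (k+1) hk hkN (by omega))
    have h2 : L[k+1]'hkN ≤ L[m]'hm := by
      rcases Nat.eq_or_lt_of_le (show k+1 ≤ m by omega) with h | h
      · simp only [h]; exact le_refl _
      · exact le_of_lt (hmono (k+1) m hkN hm h)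
    rw [hmf] at h2
    simp only [hidx]
    exact le_antisymm h1 h2

-- the collect loop walks once around the rotated list
lemma pvLoopA_rot (rot : List (List Char)) (hnd : rot.Nodup)
    (hstep : ∀ m, (hm : m < rot.length) → pvFindNext (rot[m]) = rot.getD ((m+1) % rot.length) []) :
    ∀ fuel m, 1 ≤ m → m ≤ rot.length → rot.length - m < fuel →
      pvLoopA fuel (rot.take m) (rot.getD (m % rot.length) []) = rot := by
  intro fuel
  induction fuel with
  | zero => intro m h1 h2 h3; omega
  | succ fuel ih =>
    intro m h1 h2 h3
    have hN : 0 < rot.length := by omega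
    rcases Nat.lt_or_ge m rot.length with hm | hm
    · -- the next permutation is new: append it and continue
      have hmod : m % rot.length = m := Nat.mod_eq_of_lt hm
      simp only [pvLoopA]
      have hgetD : rot.getD (m % rot.length) [] = rot[m]'hm := by
        rw [hmod]; exact List.getD_eq_getElem _ _ hm
      rw [hgetD]
      have hcount : (rot.take m).count (rot[m]'hm) = 0 := by
        rw [List.count_eq_zero]
        intro hmem
        obtain ⟨q, hq, hqe⟩ := List.mem_iff_getElem.1 hmem
        have hq' : q < m := by rw [List.length_take] at hq; omega
        have hqm : rot[q]'(by omega) = rot[m]'hm := by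
          rw [← hqe]; simp only [List.getElem_take]
        have := (hnd.getElem_inj_iff).1 hqm
        omega
      rw [if_pos hcount]
      have htake : rot.take m ++ [rot[m]'hm] = rot.take (m+1) := by
        rw [List.take_succ, List.getElem?_eq_getElem hm]
        rfl
      rw [htake, hstep m hm]
      exact ih (m+1) (by omega) (by omega) (by omega)
    · -- we are back at the start: the loop stops with the full cycle collected
      have hmN : m = rot.length := by omega
      subst hmN
      simp only [pvLoopA]
      rw [Nat.mod_self, List.take_length]
      have hgetD : rot.getD 0 [] = rot[0]'hN := List.getD_eq_getElem _ _ hN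
      rw [hgetD, if_neg ?_]
      intro hc
      rw [List.count_eq_zero] at hc
      exact hc (List.getElem_mem hN)

theorem collect_permutations_spec' : ∀ (str : String),
    collect_permutations str = collect_permutations_alt str := by
  intro str
  by_cases h0 : str.toList.length = 0
  · rw [collect_permutations, collect_permutations_alt]
    simp [h0]
  · have hne : str.toList ≠ [] := by
      intro e; rw [e] at h0; simp at h0
    set s := str.toList with hs
    set SL := PySem.List.sorted s (fun c => c) false with hSL
    set L := pvDistinctPerms SL with hLdef
    have hsp : SL.Perm s := PySem.List.sorted_perm s _ false
    have hmem_s : s ∈ L := (mem_pvDistinctPerms SL s).2 hsp.symm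
    have hN : 0 < L.length := List.length_pos_of_mem hmem_s
    obtain ⟨idx, hidx⟩ := Option.isSome_iff_exists.1 ((PySem.List.index?_isSome_iff L s).2 hmem_s)
    obtain ⟨hidxlt, hLidx, -⟩ := PySem.List.getElem_of_index?_eq_some hidx
    set rot := L.rotate idx with hrot
    have hrotlen : rot.length = L.length := List.length_rotate L idx
    have hLnd : L.Nodup :=
      (pvDistinctPerms_sorted SL (by simpa using PySem.List.sorted_pairwise s (fun c => c))).imp
        ne_of_lt
    have hrotnd : rot.Nodup := List.nodup_rotate.2 hLnd
    have hrot_eq : rot = L.drop idx ++ L.take idx :=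
      List.rotate_eq_drop_append_take (le_of_lt hidxlt)
    have hstep : ∀ m, (hm : m < rot.length) →
        pvFindNext (rot[m]) = rot.getD ((m+1) % rot.length) [] := by
      intro m hm
      have hm' : m < L.length := by rwa [hrotlen] at hm
      have hg1 : rot[m]'hm = L[(m + idx) % L.length]'(Nat.mod_lt _ (by omega)) :=
        List.getElem_rotate L idx m hm
      rw [hg1, pvFindNext_cycle s hne L hLdef ((m + idx) % L.length) (Nat.mod_lt _ (by omega))]
      have hmlt : (m+1) % rot.length < rot.length := Nat.mod_lt _ (by omega)
      rw [List.getD_eq_getElem rot [] hmlt]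
      have hg2 : rot[(m+1) % rot.length]'hmlt =
          L[(((m+1) % rot.length) + idx) % L.length]'(Nat.mod_lt _ (by omega)) :=
        List.getElem_rotate L idx ((m+1) % rot.length) hmlt
      rw [hg2]
      have harith : ((m + idx) % L.length + 1) % L.length =
          (((m+1) % rot.length) + idx) % L.length := by
        rw [hrotlen, Nat.mod_add_mod, Nat.mod_add_mod]
        congr 1
        omega
      simp only [harith]
    have hrot0 : rot[0]'(by omega) = s := by
      rw [List.getElem_rotate]
      simp only [Nat.zero_add, Nat.mod_eq_of_lt hidxlt]
      exact hLidx
    have hNle : L.length ≤ Nat.factorial s.length := by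
      have hb := length_pvDistinctPerms_le SL
      rwa [hSL, PySem.List.length_sorted] at hb
    have hloop := pvLoopA_rot rot hrotnd hstep (Nat.factorial s.length + 1) 1
      (le_refl 1) (by omega) (by omega)
    have htake1 : rot.take 1 = [s] := by
      rw [show (1 : Nat) = 0 + 1 by rfl, List.take_succ,
        List.getElem?_eq_getElem (show 0 < rot.length by omega)]
      rw [hrot0]
      rfl
    have hnext1 : pvFindNext s = rot.getD (1 % rot.length) [] := by
      conv_lhs => rw [← hrot0]
      exact hstep 0 (by omega)
    rw [collect_permutations, collect_permutations_alt]
    simp only [← hs, ← hSL, ← hLdef]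
    rw [if_neg h0, if_neg h0, hidx]
    simp only [Option.getD_some]
    rw [← hrot_eq, ← htake1, hnext1, hloop]

-- ===== VERDICT (by name: the statement is the Claim_ definition above) =====
theorem collect_permutations_spec : Claim_equal_collect_permutations := by
  intro str _
  unfold Spec_collect_permutations
  exact collect_permutations_spec' str
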